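-- pv_equiv track=rewrite | github.com/negarprh/Kakuro-Game | kakuro/services/board_service.py | _fallback_layout
-- ===== SOURCE A (Python) =====
-- def _enforce_max_run_length(layout):
--     rows = len(layout)
--     cols = len(layout[0])
--
--     for r in range(rows):
--         run_len = 0
--         for c in range(cols):
--             if layout[r][c]:
--                 run_len += 1
--                 if run_len > 9:
--                     layout[r][c] = False
--                     run_len = 0
--             else:
--                 run_len = 0
--
--     for c in range(cols):
--         run_len = 0
--         for r in range(rows):
--             if layout[r][c]:
--                 run_len += 1
--                 if run_len > 9:
--                     layout[r][c] = False
--                     run_len = 0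
--             else:
--                 run_len = 0
--
-- def _horizontal_run_length(layout, r, c):
--     cols = len(layout[0])
--     left = c
--     right = c
--
--     while left - 1 >= 0 and layout[r][left - 1]:
--         left -= 1
--
--     while right + 1 < cols and layout[r][right + 1]:
--         right += 1
--
--     return right - left + 1
--
-- def _vertical_run_length(layout, r, c):
--     rows = len(layout)
--     top = r
--     bottom = r
--
--     while top - 1 >= 0 and layout[top - 1][c]:
--         top -= 1
--
--     while bottom + 1 < rows and layout[bottom + 1][c]:
--         bottom += 1
--
--     return bottom - top + 1
--
-- def _remove_short_runs(layout):
--     rows = len(layout)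
--     cols = len(layout[0])
--
--     changed = True
--     while changed:
--         changed = False
--         for r in range(1, rows):
--             for c in range(1, cols):
--                 if not layout[r][c]:
--                     continue
--
--                 horizontal = _horizontal_run_length(layout, r, c)
--                 vertical = _vertical_run_length(layout, r, c)
--
--                 if horizontal < 2 or vertical < 2:
--                     layout[r][c] = False
--                     changed = True
--
-- def _fallback_layout(rows, cols):
--     layout = [[False for _ in range(cols)] for _ in range(rows)]
--
--     for r in range(1, rows):
--         for c in range(1, cols):
--             layout[r][c] = True
--
--     if rows > 6 and cols > 6:
--         for r in range(2, rows):
--             if (r - 1) % 4 == 0: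
--                 for c in range(2, cols):
--                     layout[r][c] = False
--
--         for c in range(2, cols):
--             if (c - 1) % 4 == 0:
--                 for r in range(2, rows):
--                     layout[r][c] = False
--
--     _enforce_max_run_length(layout)
--     _remove_short_runs(layout)
--     return layout
-- ===== SOURCE B (Python) =====
-- def _cap_runs_row(vals):
--     out = []
--     run = 0
--     for v in vals:
--         if v:
--             run += 1
--             if run > 9:
--                 out.append(False)
--                 run = 0
--             else:
--                 out.append(True)
--         else:
--             run = 0
--             out.append(False)
--     return out
--
--
-- def _ok(layout, r, c):
--     nr = len(layout)
--     nc = len(layout[r])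
--     h = (c > 0 and layout[r][c - 1]) or (c + 1 < nc and layout[r][c + 1])
--     v = (r > 0 and layout[r - 1][c]) or (r + 1 < nr and layout[r + 1][c])
--     return h and v
--
--
-- def _fallback_layout(rows, cols):
--     banded = rows > 6 and cols > 6
--
--     def _filled(r, c):
--         if r < 1 or c < 1:
--             return False
--         if banded and r >= 2 and c >= 2 and ((r - 1) % 4 == 0 or (c - 1) % 4 == 0):
--             return False
--         return True
--
--     layout = [[_filled(r, c) for c in range(cols)] for r in range(rows)]
--
--     # cap run lengths at 9: rows, then columns
--     layout = [_cap_runs_row(row) for row in layout]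
--     nr = len(layout)
--     nc = len(layout[0]) if layout else 0
--     capped_cols = [_cap_runs_row([layout[r][c] for r in range(nr)]) for c in range(nc)]
--     layout = [[capped_cols[c][r] for c in range(nc)] for r in range(nr)]
--
--     # worklist pruning of short runs: recheck only the 4 neighbours of a removal
--     queue = [(r, c) for r in range(nr) for c in range(nc) if layout[r][c]]
--     i = 0
--     while i < len(queue):
--         r, c = queue[i]
--         i += 1
--         if layout[r][c] and not _ok(layout, r, c):
--             layout[r][c] = False
--             for r2, c2 in ((r - 1, c), (r + 1, c), (r, c - 1), (r, c + 1)):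
--                 if 0 <= r2 < nr and 0 <= c2 < nc:
--                     queue.append((r2, c2))
--     return layout
-- ===== Notes on version B (the rewrite author's own statement) =====
-- stated objective: alternative
-- what changed: B builds the banded grid by a per-cell closed-form predicate instead of A's three mutation passes, caps run lengths with a reusable row scanner applied to rows and to extracted columns, and replaces A's repeat-until-stable full-board rescans (which recompute run lengths by walking each run) with a FIFO worklist that tests a constant-time neighbour condition and re-enqueues only the 4 neighbours of each removed cell.
import Mathlib
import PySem

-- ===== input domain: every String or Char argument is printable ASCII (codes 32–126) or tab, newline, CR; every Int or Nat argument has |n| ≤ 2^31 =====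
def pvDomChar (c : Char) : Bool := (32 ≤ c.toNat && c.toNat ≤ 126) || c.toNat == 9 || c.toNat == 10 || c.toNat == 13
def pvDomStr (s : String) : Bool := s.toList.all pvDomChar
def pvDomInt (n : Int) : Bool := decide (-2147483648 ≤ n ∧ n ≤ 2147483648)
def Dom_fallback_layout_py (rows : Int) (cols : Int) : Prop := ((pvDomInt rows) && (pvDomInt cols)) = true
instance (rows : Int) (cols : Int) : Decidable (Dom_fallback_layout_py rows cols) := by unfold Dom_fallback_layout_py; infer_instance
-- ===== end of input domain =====

-- B replaces A's repeat-until-stable full-board rescans (with run lengths recomputed by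
-- walking each run) by a closed-form cell predicate, a reusable row scanner applied to rows
-- and extracted columns, and a FIFO worklist testing a constant-time neighbour condition,
-- re-enqueuing only the 4 neighbours of each removal (objective: alternative algorithm).

-- ===== PORT A =====
-- shared grid primitives (Python layout[r][c] reads / writes; indices are in range wherever
-- the Pythons access them, so List.getD/List.set are exact there)
def cell (g : List (List Bool)) (r c : Nat) : Bool := (g.getD r []).getD c false
def setCell (g : List (List Bool)) (r c : Nat) (b : Bool) : List (List Bool) :=
  g.set r ((g.getD r []).set c b)
def trueCount (g : List (List Bool)) : Nat := (g.map (fun row => row.count true)).sum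
def rngN (a b : Nat) : List Nat := List.range' a (b - a)

theorem count_set_false_lt (l : List Bool) (c : Nat) (h : l.getD c false = true) :
    (l.set c false).count true < l.count true := by
  induction l generalizing c with
  | nil => simp [List.getD] at h
  | cons a t ih =>
    cases c with
    | zero =>
      simp [List.getD] at h; subst h
      simp
    | succ c =>
      simp [List.getD] at h
      have := ih c (by simpa [List.getD] using h)
      simp [List.count_cons]
      omega

theorem trueCount_setCell_lt (g : List (List Bool)) (r c : Nat) (h : cell g r c = true) :
    trueCount (setCell g r c false) < trueCount g := by
  induction g generalizing r with
  | nil => simp [cell, List.getD] at h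
  | cons row t ih =>
    cases r with
    | zero =>
      have : (row.set c false).count true < row.count true :=
        count_set_false_lt row c (by simpa [cell, List.getD] using h)
      simp [setCell, trueCount, List.getD]
      omega
    | succ r =>
      have := ih r (by simpa [cell, List.getD] using h)
      simp [setCell, trueCount, List.getD] at this ⊢
      omega

-- generic fold-flattening (termination lemmas for the while-loops below need it)
theorem foldl_nested {α β γ : Type} (f : γ → α → β → γ) (rs : List α) (cs : List β) (init : γ) :
    rs.foldl (fun s r => cs.foldl (fun s c => f s r c) s) init
      = (rs.flatMap (fun r => cs.map (fun c => (r, c)))).foldl (fun s rc => f s rc.1 rc.2) init := by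
  induction rs generalizing init with
  | nil => simp
  | cons r rs ih =>
    simp only [List.foldl_cons, List.flatMap_cons, List.foldl_append, ih, List.foldl_map]

-- main port A body helpers
def pyBuild (rows cols : Int) : List (List Bool) :=
  (List.range rows.toNat).map (fun _ => (List.range cols.toNat).map (fun _ => false))

def pyFillInterior (rows cols : Int) (g : List (List Bool)) : List (List Bool) :=
  (rngN 1 rows.toNat).foldl
    (fun g r => (rngN 1 cols.toNat).foldl (fun g c => setCell g r c true) g) g

def pyBandRows (rows cols : Int) (g : List (List Bool)) : List (List Bool) :=
  (rngN 2 rows.toNat).foldl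
    (fun g r => if (r - 1) % 4 = 0 then
        (rngN 2 cols.toNat).foldl (fun g c => setCell g r c false) g
      else g) g

def pyBandCols (rows cols : Int) (g : List (List Bool)) : List (List Bool) :=
  (rngN 2 cols.toNat).foldl
    (fun g c => if (c - 1) % 4 = 0 then
        (rngN 2 rows.toNat).foldl (fun g r => setCell g r c false) g
      else g) g

-- one step of the run_len-counter loops of _enforce_max_run_length
def enfStep (s : List (List Bool) × Nat) (r c : Nat) : List (List Bool) × Nat :=
  if cell s.1 r c = true then
    (if s.2 + 1 > 9 then (setCell s.1 r c false, 0) else (s.1, s.2 + 1))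
  else (s.1, 0)

def enforceRows (g0 : List (List Bool)) : List (List Bool) :=
  let R := g0.length
  let C := (g0.headD []).length
  (List.range R).foldl (fun g r =>
    ((List.range C).foldl (fun s c => enfStep s r c) (g, 0)).1) g0

def enforceCols (g0 : List (List Bool)) : List (List Bool) :=
  let R := g0.length
  let C := (g0.headD []).length
  (List.range C).foldl (fun g c =>
    ((List.range R).foldl (fun s r => enfStep s r c) (g, 0)).1) g0

-- the four while-loops of _horizontal_run_length / _vertical_run_length
def goLeft (g : List (List Bool)) (r : Nat) : Nat → Nat
  | 0 => 0
  | l + 1 => if cell g r l = true then goLeft g r l else l + 1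

def goRight (g : List (List Bool)) (r C x : Nat) : Nat :=
  if x + 1 < C ∧ cell g r (x + 1) = true then goRight g r C (x + 1) else x
termination_by C - x
decreasing_by omega

def goUp (g : List (List Bool)) (c : Nat) : Nat → Nat
  | 0 => 0
  | t + 1 => if cell g t c = true then goUp g c t else t + 1

def goDown (g : List (List Bool)) (c R x : Nat) : Nat :=
  if x + 1 < R ∧ cell g (x + 1) c = true then goDown g c R (x + 1) else x
termination_by R - x
decreasing_by omega

def hrlP (g : List (List Bool)) (r c : Nat) : Nat :=
  goRight g r ((g.headD []).length) c - goLeft g r c + 1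

def vrlP (g : List (List Bool)) (r c : Nat) : Nat :=
  goDown g c g.length r - goUp g c r + 1

-- one cell check of _remove_short_runs' pass
def rsStep (s : List (List Bool) × Bool) (r c : Nat) : List (List Bool) × Bool :=
  if cell s.1 r c = true then
    (if hrlP s.1 r c < 2 ∨ vrlP s.1 r c < 2 then (setCell s.1 r c false, true) else s)
  else s

def rsPass (g0 : List (List Bool)) : List (List Bool) × Bool :=
  let R := g0.length
  let C := (g0.headD []).length
  (rngN 1 R).foldl (fun s r => (rngN 1 C).foldl (fun s c => rsStep s r c) s) (g0, false)

-- termination lemma for the 'while changed' loop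
theorem rsFold_tc (cs : List (Nat × Nat)) (s : List (List Bool) × Bool) :
    trueCount (cs.foldl (fun s rc => rsStep s rc.1 rc.2) s).1 ≤ trueCount s.1 ∧
      ((cs.foldl (fun s rc => rsStep s rc.1 rc.2) s).2 = true →
        s.2 = true ∨ trueCount (cs.foldl (fun s rc => rsStep s rc.1 rc.2) s).1 < trueCount s.1) := by
  induction cs generalizing s with
  | nil => simp
  | cons rc cs ih =>
    simp only [List.foldl_cons]
    rcases ih (rsStep s rc.1 rc.2) with ⟨h1, h2⟩
    unfold rsStep at *
    split_ifs at * with hc hv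
    · have := trueCount_setCell_lt s.1 rc.1 rc.2 hc
      constructor
      · simp at h1 ⊢; omega
      · intro _; right; simp at h1 ⊢; omega
    · exact ⟨h1, h2⟩
    · exact ⟨h1, h2⟩

theorem rsPass_changed_lt (g : List (List Bool)) (h : (rsPass g).2 = true) :
    trueCount (rsPass g).1 < trueCount g := by
  have e : rsPass g = ((rngN 1 g.length).flatMap
      (fun r => (rngN 1 (g.headD []).length).map (fun c => (r, c)))).foldl
        (fun s rc => rsStep s rc.1 rc.2) (g, false) := by
    simpa [rsPass] using foldl_nested (fun s r c => rsStep s r c) (rngN 1 g.length)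
      (rngN 1 (g.headD []).length) (g, false)
  rw [e] at h ⊢
  rcases rsFold_tc _ (g, false) with ⟨_, h2⟩
  rcases h2 h with h | h
  · simp at h
  · exact h

def rsLoop (g : List (List Bool)) : List (List Bool) :=
  let p := rsPass g
  if h : p.2 = true then rsLoop p.1 else p.1
termination_by trueCount g
decreasing_by exact rsPass_changed_lt g h

def fallback_layout_py (rows : Int) (cols : Int) : List (List Bool) :=
  let g1 := pyFillInterior rows cols (pyBuild rows cols)
  let g2 := if rows > 6 ∧ cols > 6 then pyBandCols rows cols (pyBandRows rows cols g1) else g1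
  rsLoop (enforceCols (enforceRows g2))

-- ===== PORT B =====
def capRun : Nat → List Bool → List Bool
  | _, [] => []
  | run, v :: t =>
    if v then
      (if run + 1 > 9 then false :: capRun 0 t else true :: capRun (run + 1) t)
    else false :: capRun 0 t

def capRow (l : List Bool) : List Bool := capRun 0 l

def okB (g : List (List Bool)) (r c : Nat) : Bool :=
  let nr := g.length
  let nc := (g.getD r []).length
  ((decide (0 < c) && cell g r (c - 1)) || (decide (c + 1 < nc) && cell g r (c + 1))) &&
    ((decide (0 < r) && cell g (r - 1) c) || (decide (r + 1 < nr) && cell g (r + 1) c))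

def filledB (banded : Bool) (r c : Nat) : Bool :=
  if r < 1 ∨ c < 1 then false
  else if banded && decide (2 ≤ r) && decide (2 ≤ c) &&
      (decide ((r - 1) % 4 = 0) || decide ((c - 1) % 4 = 0)) then false
  else true

def bNbrs (r c nr nc : Nat) : List (Nat × Nat) :=
  (if 0 < r then [(r - 1, c)] else []) ++ (if r + 1 < nr then [(r + 1, c)] else []) ++
    (if 0 < c then [(r, c - 1)] else []) ++ (if c + 1 < nc then [(r, c + 1)] else [])

theorem bNbrs_length_le (r c nr nc : Nat) : (bNbrs r c nr nc).length ≤ 4 := by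
  unfold bNbrs; split_ifs <;> simp

def wl (g : List (List Bool)) (q : List (Nat × Nat)) (nr nc : Nat) : List (List Bool) :=
  match q with
  | [] => g
  | (r, c) :: rest =>
    if h : cell g r c = true ∧ okB g r c = false then
      wl (setCell g r c false) (rest ++ bNbrs r c nr nc) nr nc
    else wl g rest nr nc
termination_by 5 * trueCount g + q.length
decreasing_by
  · have h1 := trueCount_setCell_lt g r c h.1
    have h2 := bNbrs_length_le r c nr nc
    simp only [List.length_append, List.length_cons]
    omega
  · simp only [List.length_cons]; omega

def bGrid1 (rows cols : Int) : List (List Bool) :=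
  (List.range rows.toNat).map (fun r => (List.range cols.toNat).map (fun c =>
    filledB (decide (rows > 6) && decide (cols > 6)) r c))

def bCapRows (g : List (List Bool)) : List (List Bool) := g.map capRow

def bCapCols (g : List (List Bool)) : List (List Bool) :=
  let nr := g.length
  let nc := (g.headD []).length
  let cappedCols := (List.range nc).map (fun c => capRow ((List.range nr).map (fun r => cell g r c)))
  (List.range nr).map (fun r => (List.range nc).map (fun c => (cappedCols.getD c []).getD r false))

def bQueue (g : List (List Bool)) (nr nc : Nat) : List (Nat × Nat) :=
  (List.range nr).flatMap (fun r =>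
    (List.range nc).filterMap (fun c => if cell g r c = true then some (r, c) else none))

def fallback_layout_py_alt (rows : Int) (cols : Int) : List (List Bool) :=
  let g2 := bCapRows (bGrid1 rows cols)
  let nr := g2.length
  let nc := (g2.headD []).length
  let g3 := bCapCols g2
  wl g3 (bQueue g3 nr nc) nr nc


-- ===== PRECONDITION & SPEC =====
-- Pre_ excludes exactly the inputs where Python A raises: rows ≤ 0 makes layout == [] and
-- len(layout[0]) in _enforce_max_run_length raises IndexError. A returns on all other inputs.
def Pre_fallback_layout_py (rows : Int) (cols : Int) : Prop := 1 ≤ rows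
instance (rows : Int) (cols : Int) : Decidable (Pre_fallback_layout_py rows cols) := by
  unfold Pre_fallback_layout_py; infer_instance

def pvWitness_fallback_layout_py : Int × Int := (3, 4)

def Spec_fallback_layout_py (rows : Int) (cols : Int) (out : List (List Bool)) : Prop :=
  out = fallback_layout_py_alt rows cols
instance (rows : Int) (cols : Int) (out : List (List Bool)) :
    Decidable (Spec_fallback_layout_py rows cols out) := by
  unfold Spec_fallback_layout_py; infer_instance

-- ===== CLAIM (what is proved, stated in full; the proofs are below) =====
def Claim_equal_fallback_layout_py : Prop := ∀ (rows : Int) (cols : Int),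
  Dom_fallback_layout_py rows cols → Pre_fallback_layout_py rows cols →
    Spec_fallback_layout_py rows cols (fallback_layout_py rows cols)

-- ===== LEMMAS AND PROOFS =====
-- ===== proof infrastructure =====
theorem headD_eq_getD (l : List (List Bool)) : l.headD [] = l.getD 0 [] := by
  cases l <;> simp [List.getD]

theorem length_setCell (g : List (List Bool)) (r c : Nat) (b : Bool) :
    (setCell g r c b).length = g.length := by simp [setCell]

theorem getD_row_setCell (g : List (List Bool)) (r c : Nat) (b : Bool) (r' : Nat) :
    (setCell g r c b).getD r' [] =
      if r' = r ∧ r < g.length then (g.getD r []).set c b else g.getD r' [] := by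
  by_cases hr : r < g.length
  · by_cases he : r' = r
    · subst he
      simp [setCell, hr, List.getD_eq_getElem?_getD, List.getElem?_set_self,
        List.getElem?_eq_getElem hr]
    · simp [setCell, he, List.getD_eq_getElem?_getD, List.getElem?_set_ne (Ne.symm he)]
  · simp [setCell, List.set_eq_of_length_le (by omega : g.length ≤ r), hr]

theorem getD_set_row (l : List Bool) (c : Nat) (b : Bool) (c' : Nat) :
    (l.set c b).getD c' false =
      if c' = c ∧ c < l.length then b else l.getD c' false := by
  by_cases hc : c < l.length
  · by_cases he : c' = c
    · subst he
      simp [hc, List.getD_eq_getElem?_getD, List.getElem?_set_self, List.getElem?_eq_getElem hc]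
    · simp [he, List.getD_eq_getElem?_getD, List.getElem?_set_ne (Ne.symm he)]
  · simp [List.set_eq_of_length_le (by omega : l.length ≤ c), hc]

theorem rowlen_setCell (g : List (List Bool)) (r c : Nat) (b : Bool) (r' : Nat) :
    ((setCell g r c b).getD r' []).length = (g.getD r' []).length := by
  rw [getD_row_setCell]
  split_ifs with h
  · rcases h with ⟨h1, _⟩; subst h1; simp
  · rfl

theorem cell_setCell (g : List (List Bool)) (r c : Nat) (b : Bool) (r' c' : Nat) :
    cell (setCell g r c b) r' c' =
      if r' = r ∧ c' = c ∧ r < g.length ∧ c < (g.getD r []).length then b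
      else cell g r' c' := by
  unfold cell
  rw [getD_row_setCell]
  by_cases he : r' = r
  · subst he
    by_cases hl : r' < g.length
    · rw [if_pos ⟨rfl, hl⟩, getD_set_row]
      by_cases h1 : c' = c
      · subst h1
        by_cases h2 : c' < (g.getD r' []).length
        · simp [h2, hl]
        · simp [h2, hl]
      · simp [h1]
    · simp [hl]
  · simp [he]

theorem cell_true_lt (g : List (List Bool)) (r c : Nat) (h : cell g r c = true) :
    r < g.length ∧ c < (g.getD r []).length := by
  constructor
  · by_contra hr
    have h0 : g.getD r [] = [] := by apply List.getD_eq_default; omega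
    rw [cell, h0] at h
    exact absurd h (by simp)
  · by_contra hc
    have h0 : (g.getD r []).getD c false = false := by apply List.getD_eq_default; omega
    rw [cell, h0] at h
    exact absurd h (by simp)

theorem cell_setCell_false_le (g : List (List Bool)) (r c x y : Nat)
    (h : cell (setCell g r c false) x y = true) : cell g x y = true := by
  rw [cell_setCell] at h
  by_cases hc : x = r ∧ y = c ∧ r < g.length ∧ c < (g.getD r []).length
  · rw [if_pos hc] at h; cases h
  · rwa [if_neg hc] at h

def SubG (g h : List (List Bool)) : Prop := ∀ r c, cell g r c = true → cell h r c = true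

def SameShape (g h : List (List Bool)) : Prop :=
  g.length = h.length ∧ ∀ r, ((g.getD r []).length = (h.getD r []).length)

def StableG (g : List (List Bool)) : Prop := ∀ r c, cell g r c = true → okB g r c = true

inductive Reach : List (List Bool) → List (List Bool) → Prop
  | refl (g) : Reach g g
  | step {g g' : List (List Bool)} {r c : Nat} :
      cell g r c = true → okB g r c = false → Reach (setCell g r c false) g' → Reach g g'

theorem sameShape_refl (g : List (List Bool)) : SameShape g g := ⟨rfl, fun _ => rfl⟩
theorem sameShape_symm {g h : List (List Bool)} (s : SameShape g h) : SameShape h g :=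
  ⟨s.1.symm, fun r => (s.2 r).symm⟩
theorem sameShape_trans {g h k : List (List Bool)} (s : SameShape g h) (t : SameShape h k) :
    SameShape g k := ⟨s.1.trans t.1, fun r => (s.2 r).trans (t.2 r)⟩

theorem sameShape_setCell (g : List (List Bool)) (r c : Nat) (b : Bool) :
    SameShape (setCell g r c b) g :=
  ⟨length_setCell g r c b, fun r' => rowlen_setCell g r c b r'⟩

theorem reach_shape {g g' : List (List Bool)} (h : Reach g g') : SameShape g g' := by
  induction h with
  | refl => exact sameShape_refl _
  | step _ _ _ ih => exact sameShape_trans (sameShape_symm (sameShape_setCell _ _ _ _)) ih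

theorem reach_sub {g g' : List (List Bool)} (h : Reach g g') : SubG g' g := by
  induction h with
  | refl => exact fun _ _ h => h
  | step _ _ _ ih => exact fun x y hx => cell_setCell_false_le _ _ _ _ _ (ih x y hx)

theorem reach_trans {g h k : List (List Bool)} (a : Reach g h) (b : Reach h k) : Reach g k := by
  induction a with
  | refl => exact b
  | step h1 h2 _ ih => exact Reach.step h1 h2 (ih b)

theorem okB_mono {g h : List (List Bool)} (s : SameShape g h) (sub : SubG g h) (r c : Nat)
    (hok : okB g r c = true) : okB h r c = true := by
  unfold okB at hok ⊢
  simp only [Bool.and_eq_true, Bool.or_eq_true, decide_eq_true_eq] at hok ⊢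
  rw [← s.2 r, ← s.1]
  rcases hok with ⟨hH, hV⟩
  constructor
  · rcases hH with ⟨h1, h2⟩ | ⟨h1, h2⟩
    · exact Or.inl ⟨h1, sub _ _ h2⟩
    · exact Or.inr ⟨h1, sub _ _ h2⟩
  · rcases hV with ⟨h1, h2⟩ | ⟨h1, h2⟩
    · exact Or.inl ⟨h1, sub _ _ h2⟩
    · exact Or.inr ⟨h1, sub _ _ h2⟩

theorem sub_of_reach_stable {g g' p : List (List Bool)} (h : Reach g g') (hp : SubG p g)
    (hs : SameShape p g) (hst : StableG p) : SubG p g' := by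
  induction h with
  | refl => exact hp
  | @step g g' r c h1 h2 _ ih =>
    have hpg1 : SubG p (setCell g r c false) := by
      intro x y hx
      have hxg := hp x y hx
      by_cases he : x = r ∧ y = c
      · exfalso
        rcases he with ⟨hxr, hyc⟩; subst hxr; subst hyc
        have := okB_mono hs hp x y (hst x y hx)
        rw [this] at h2; cases h2
      · rw [cell_setCell]
        rw [if_neg (by tauto)]
        exact hxg
    exact ih hpg1 (sameShape_trans hs (sameShape_symm (sameShape_setCell _ _ _ _)))

theorem grid_ext {a b : List (List Bool)} (s : SameShape a b)
    (h : ∀ r c, cell a r c = cell b r c) : a = b := by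
  apply List.ext_getElem s.1
  intro r h1 h2
  apply List.ext_getElem
  · have := s.2 r
    rwa [List.getD_eq_getElem _ _ h1, List.getD_eq_getElem _ _ h2] at this
  · intro c hc1 hc2
    have := h r c
    rwa [cell, cell, List.getD_eq_getElem _ _ h1, List.getD_eq_getElem _ _ h2,
      List.getD_eq_getElem _ _ hc1, List.getD_eq_getElem _ _ hc2] at this

theorem final_unique {g a b : List (List Bool)} (ha : Reach g a) (hsa : StableG a)
    (hb : Reach g b) (hsb : StableG b) : a = b := by
  have sag : SameShape a g := sameShape_symm (reach_shape ha)
  have sbg : SameShape b g := sameShape_symm (reach_shape hb)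
  have sab : SameShape a b := sameShape_trans sag (sameShape_symm sbg)
  have hab : SubG a b := sub_of_reach_stable hb (reach_sub ha) sag hsa
  have hba : SubG b a := sub_of_reach_stable ha (reach_sub hb) sbg hsb
  apply grid_ext sab
  intro r c
  cases hac : cell a r c
  · cases hbc : cell b r c
    · rfl
    · rw [hba r c hbc] at hac; cases hac
  · rw [hab r c hac]

-- new violations after a removal are adjacent to the removed cell
theorem new_violation {g : List (List Bool)} {r c x y : Nat}
    (hok : okB g x y = true) (hok' : okB (setCell g r c false) x y = false) :
    (x = r ∧ (y + 1 = c ∨ y = c + 1)) ∨ (y = c ∧ (x + 1 = r ∨ x = r + 1)) := by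
  have hs := sameShape_setCell g r c false
  unfold okB at hok hok'
  simp only [Bool.and_eq_true, Bool.or_eq_true, decide_eq_true_eq] at hok
  rw [hs.2 x, hs.1] at hok'
  simp only [Bool.and_eq_false_iff, Bool.or_eq_false_iff, Bool.and_eq_false_iff,
    decide_eq_false_iff_not] at hok'
  have key : ∀ u v : Nat, cell g u v = true → cell (setCell g r c false) u v = false →
      u = r ∧ v = c := by
    intro u v h1 h2
    rw [cell_setCell] at h2
    by_cases hc : u = r ∧ v = c ∧ r < g.length ∧ c < (g.getD r []).length
    · exact ⟨hc.1, hc.2.1⟩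
    · rw [if_neg hc, h1] at h2; cases h2
  rcases hok with ⟨hH, hV⟩
  rcases hok' with ⟨ha, hb⟩ | ⟨ha, hb⟩
  · left
    rcases hH with ⟨h0, h1⟩ | ⟨h0, h1⟩
    · rcases ha with ha | ha
      · exact absurd h0 ha
      · rcases key _ _ h1 ha with ⟨e1, e2⟩
        exact ⟨e1, Or.inr (by omega)⟩
    · rcases hb with hb | hb
      · exact absurd h0 hb
      · rcases key _ _ h1 hb with ⟨e1, e2⟩
        exact ⟨e1, Or.inl (by omega)⟩
  · right
    rcases hV with ⟨h0, h1⟩ | ⟨h0, h1⟩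
    · rcases ha with ha | ha
      · exact absurd h0 ha
      · rcases key _ _ h1 ha with ⟨e1, e2⟩
        exact ⟨e2, Or.inr (by omega)⟩
    · rcases hb with hb | hb
      · exact absurd h0 hb
      · rcases key _ _ h1 hb with ⟨e1, e2⟩
        exact ⟨e2, Or.inl (by omega)⟩

theorem mem_bNbrs_up {r c nr nc : Nat} (h : 0 < r) : (r - 1, c) ∈ bNbrs r c nr nc := by
  simp [bNbrs, h]
theorem mem_bNbrs_down {r c nr nc : Nat} (h : r + 1 < nr) : (r + 1, c) ∈ bNbrs r c nr nc := by
  simp [bNbrs, h]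
theorem mem_bNbrs_left {r c nr nc : Nat} (h : 0 < c) : (r, c - 1) ∈ bNbrs r c nr nc := by
  simp [bNbrs, h]
theorem mem_bNbrs_right {r c nr nc : Nat} (h : c + 1 < nc) : (r, c + 1) ∈ bNbrs r c nr nc := by
  simp [bNbrs, h]

theorem wl_spec (nr nc : Nat) : ∀ (g : List (List Bool)) (q : List (Nat × Nat)),
    (∀ r c, cell g r c = true → r < nr ∧ c < nc) →
    (∀ r c, cell g r c = true → okB g r c = false → (r, c) ∈ q) →
    Reach g (wl g q nr nc) ∧ StableG (wl g q nr nc) := by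
  intro g q
  induction g, q using wl.induct (nr := nr) (nc := nc) with
  | case1 g =>
    intro _ hcov
    rw [wl]
    refine ⟨Reach.refl g, ?_⟩
    intro r c hrc
    cases hok : okB g r c with
    | true => rfl
    | false => exact absurd (hcov r c hrc hok) (by simp)
  | case2 g r c rest h ih =>
    intro hbnd hcov
    rw [wl]
    simp only [dif_pos h]
    have hle : ∀ x y, cell (setCell g r c false) x y = true → cell g x y = true :=
      fun x y hxy => cell_setCell_false_le _ _ _ _ _ hxy
    have hbnd' : ∀ x y, cell (setCell g r c false) x y = true → x < nr ∧ y < nc :=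
      fun x y hxy => hbnd x y (hle x y hxy)
    have hcov' : ∀ x y, cell (setCell g r c false) x y = true →
        okB (setCell g r c false) x y = false → (x, y) ∈ rest ++ bNbrs r c nr nc := by
      intro x y hxy hok'
      rw [List.mem_append]
      cases hok : okB g x y with
      | false =>
        have hmem := hcov x y (hle x y hxy) hok
        rcases List.mem_cons.mp hmem with hhd | htl
        · exfalso
          have : cell (setCell g r c false) r c = false := by
            rcases cell_true_lt g r c h.1 with ⟨h1, h2⟩
            rw [cell_setCell, if_pos ⟨rfl, rfl, h1, h2⟩]
          rw [Prod.mk.injEq] at hhd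
          rw [hhd.1, hhd.2] at hxy
          rw [this] at hxy; cases hxy
        · exact Or.inl htl
      | true =>
        right
        rcases new_violation hok hok' with ⟨e1, e2 | e2⟩ | ⟨e1, e2 | e2⟩
        · have : (x, y) = (r, c - 1) := by subst e1; rw [Prod.mk.injEq]; omega
          rw [this]; exact mem_bNbrs_left (by omega)
        · have : (x, y) = (r, c + 1) := by subst e1; rw [Prod.mk.injEq]; omega
          rw [this]
          exact mem_bNbrs_right (by
            have := (hbnd' x y hxy).2; omega)
        · have : (x, y) = (r - 1, c) := by subst e1; rw [Prod.mk.injEq]; omega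
          rw [this]; exact mem_bNbrs_up (by omega)
        · have : (x, y) = (r + 1, c) := by subst e1; rw [Prod.mk.injEq]; omega
          rw [this]
          exact mem_bNbrs_down (by
            have := (hbnd' x y hxy).1; omega)
    rcases ih hbnd' hcov' with ⟨hre, hst⟩
    exact ⟨Reach.step h.1 h.2 hre, hst⟩
  | case3 g r c rest h ih =>
    intro hbnd hcov
    rw [wl]
    simp only [dif_neg h]
    apply ih hbnd
    intro x y hxy hok
    have hmem := hcov x y hxy hok
    rcases List.mem_cons.mp hmem with hhd | htl
    · exfalso
      rw [Prod.mk.injEq] at hhd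
      rw [hhd.1, hhd.2] at hxy hok
      exact h ⟨hxy, hok⟩
    · exact htl

def Rect (g : List (List Bool)) : Prop :=
  ∀ r, r < g.length → (g.getD r []).length = (g.headD []).length

theorem goLeft_le (g : List (List Bool)) (r : Nat) : ∀ c, goLeft g r c ≤ c := by
  intro c
  induction c with
  | zero => simp [goLeft]
  | succ l ih =>
    rw [goLeft]
    split_ifs with h
    · omega
    · omega

theorem goLeft_eq_iff (g : List (List Bool)) (r c : Nat) :
    goLeft g r c = c ↔ (c = 0 ∨ cell g r (c - 1) = false) := by
  cases c with
  | zero => simp [goLeft]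
  | succ l =>
    rw [goLeft]
    split_ifs with h
    · have := goLeft_le g r l
      constructor
      · intro e; omega
      · intro e
        rcases e with e | e
        · cases e
        · simp at e; rw [h] at e; cases e
    · simp only [Nat.add_sub_cancel]
      constructor
      · intro _
        right
        cases hc : cell g r l
        · rfl
        · exact absurd hc h
      · intro _
        trivial

theorem goRight_ge (g : List (List Bool)) (r C x : Nat) : x ≤ goRight g r C x := by
  induction x using goRight.induct (g := g) (r := r) (C := C) with
  | case1 x h ih => rw [goRight, if_pos h]; omega
  | case2 x h => rw [goRight, if_neg h]

theorem goRight_eq_iff (g : List (List Bool)) (r C x : Nat) :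
    goRight g r C x = x ↔ ¬(x + 1 < C ∧ cell g r (x + 1) = true) := by
  rw [goRight]
  split_ifs with h
  · have := goRight_ge g r C (x + 1)
    constructor
    · intro e; omega
    · intro e; exact absurd h e
  · simp [h]

theorem goUp_le (g : List (List Bool)) (c : Nat) : ∀ r, goUp g c r ≤ r := by
  intro r
  induction r with
  | zero => simp [goUp]
  | succ t ih =>
    rw [goUp]
    split_ifs with h
    · omega
    · omega

theorem goUp_eq_iff (g : List (List Bool)) (c r : Nat) :
    goUp g c r = r ↔ (r = 0 ∨ cell g (r - 1) c = false) := by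
  cases r with
  | zero => simp [goUp]
  | succ t =>
    rw [goUp]
    split_ifs with h
    · have := goUp_le g c t
      constructor
      · intro e; omega
      · intro e
        rcases e with e | e
        · cases e
        · simp at e; rw [h] at e; cases e
    · simp only [Nat.add_sub_cancel]
      constructor
      · intro _
        right
        cases hc : cell g t c
        · rfl
        · exact absurd hc h
      · intro _
        trivial

theorem goDown_ge (g : List (List Bool)) (c R x : Nat) : x ≤ goDown g c R x := by
  induction x using goDown.induct (g := g) (c := c) (R := R) with
  | case1 x h ih => rw [goDown, if_pos h]; omega
  | case2 x h => rw [goDown, if_neg h]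

theorem goDown_eq_iff (g : List (List Bool)) (c R x : Nat) :
    goDown g c R x = x ↔ ¬(x + 1 < R ∧ cell g (x + 1) c = true) := by
  rw [goDown]
  split_ifs with h
  · have := goDown_ge g c R (x + 1)
    constructor
    · intro e; omega
    · intro e; exact absurd h e
  · simp [h]

theorem bad_iff (g : List (List Bool)) (hRect : Rect g) (r c : Nat) (h : cell g r c = true) :
    (hrlP g r c < 2 ∨ vrlP g r c < 2) ↔ okB g r c = false := by
  rcases cell_true_lt g r c h with ⟨hr, hc⟩
  have hlen : (g.getD r []).length = (g.headD []).length := hRect r hr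
  have hH : hrlP g r c < 2 ↔
      (¬(0 < c ∧ cell g r (c - 1) = true) ∧
        ¬(c + 1 < (g.getD r []).length ∧ cell g r (c + 1) = true)) := by
    unfold hrlP
    have l1 := goLeft_le g r c
    have l2 := goRight_ge g r ((g.headD []).length) c
    rw [hlen]
    constructor
    · intro hlt
      have e1 : goLeft g r c = c := by omega
      have e2 : goRight g r ((g.headD []).length) c = c := by omega
      rw [goLeft_eq_iff] at e1
      rw [goRight_eq_iff] at e2
      refine ⟨?_, e2⟩
      rintro ⟨hc0, hcl⟩
      rcases e1 with e1 | e1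
      · omega
      · rw [hcl] at e1; cases e1
    · rintro ⟨h1, h2⟩
      have e1 : goLeft g r c = c := by
        rw [goLeft_eq_iff]
        by_cases hc0 : c = 0
        · exact Or.inl hc0
        · right
          cases hcl : cell g r (c - 1)
          · rfl
          · exact absurd ⟨by omega, hcl⟩ h1
      have e2 : goRight g r ((g.headD []).length) c = c := by
        rw [goRight_eq_iff]; exact h2
      omega
  have hV : vrlP g r c < 2 ↔
      (¬(0 < r ∧ cell g (r - 1) c = true) ∧ ¬(r + 1 < g.length ∧ cell g (r + 1) c = true)) := by
    unfold vrlP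
    have l1 := goUp_le g c r
    have l2 := goDown_ge g c g.length r
    constructor
    · intro hlt
      have e1 : goUp g c r = r := by omega
      have e2 : goDown g c g.length r = r := by omega
      rw [goUp_eq_iff] at e1
      rw [goDown_eq_iff] at e2
      refine ⟨?_, e2⟩
      rintro ⟨hr0, hrl⟩
      rcases e1 with e1 | e1
      · omega
      · rw [hrl] at e1; cases e1
    · rintro ⟨h1, h2⟩
      have e1 : goUp g c r = r := by
        rw [goUp_eq_iff]
        by_cases hr0 : r = 0
        · exact Or.inl hr0
        · right
          cases hrl : cell g (r - 1) c
          · rfl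
          · exact absurd ⟨by omega, hrl⟩ h1
      have e2 : goDown g c g.length r = r := by
        rw [goDown_eq_iff]; exact h2
      omega
  have hOK : okB g r c = false ↔
      ((¬(0 < c ∧ cell g r (c - 1) = true) ∧
        ¬(c + 1 < (g.getD r []).length ∧ cell g r (c + 1) = true)) ∨
       (¬(0 < r ∧ cell g (r - 1) c = true) ∧ ¬(r + 1 < g.length ∧ cell g (r + 1) c = true))) := by
    unfold okB
    simp only [Bool.and_eq_false_iff, Bool.or_eq_false_iff, Bool.and_eq_false_iff,
      decide_eq_false_iff_not]
    constructor
    · rintro (⟨ha, hb⟩ | ⟨ha, hb⟩)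
      · left
        constructor
        · rintro ⟨u, v⟩
          rcases ha with ha | ha
          · exact ha u
          · rw [v] at ha; cases ha
        · rintro ⟨u, v⟩
          rcases hb with hb | hb
          · exact hb u
          · rw [v] at hb; cases hb
      · right
        constructor
        · rintro ⟨u, v⟩
          rcases ha with ha | ha
          · exact ha u
          · rw [v] at ha; cases ha
        · rintro ⟨u, v⟩
          rcases hb with hb | hb
          · exact hb u
          · rw [v] at hb; cases hb
    · rintro (⟨ha, hb⟩ | ⟨ha, hb⟩)
      · left
        constructor
        · by_cases h0 : 0 < c
          · right; cases hu : cell g r (c - 1); rfl; exact absurd ⟨h0, hu⟩ ha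
          · exact Or.inl h0
        · by_cases h0 : c + 1 < (g.getD r []).length
          · right; cases hu : cell g r (c + 1); rfl; exact absurd ⟨h0, hu⟩ hb
          · exact Or.inl h0
      · right
        constructor
        · by_cases h0 : 0 < r
          · right; cases hu : cell g (r - 1) c; rfl; exact absurd ⟨h0, hu⟩ ha
          · exact Or.inl h0
        · by_cases h0 : r + 1 < g.length
          · right; cases hu : cell g (r + 1) c; rfl; exact absurd ⟨h0, hu⟩ hb
          · exact Or.inl h0
  rw [hH, hV, hOK]

def cellsA (g : List (List Bool)) : List (Nat × Nat) :=
  (rngN 1 g.length).flatMap (fun r => (rngN 1 (g.headD []).length).map (fun c => (r, c)))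

theorem rsPass_eq (g : List (List Bool)) :
    rsPass g = (cellsA g).foldl (fun s rc => rsStep s rc.1 rc.2) (g, false) := by
  simpa [rsPass, cellsA] using foldl_nested (fun s r c => rsStep s r c) (rngN 1 g.length)
    (rngN 1 (g.headD []).length) (g, false)

theorem rect_setCell {g : List (List Bool)} (hR : Rect g) (r c : Nat) (b : Bool) :
    Rect (setCell g r c b) := by
  intro r' hr'
  rw [rowlen_setCell, headD_eq_getD, rowlen_setCell, ← headD_eq_getD]
  exact hR r' (by rwa [length_setCell] at hr')

theorem rsFold_reach (cs : List (Nat × Nat)) :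
    ∀ s : List (List Bool) × Bool, Rect s.1 →
      Reach s.1 (cs.foldl (fun s rc => rsStep s rc.1 rc.2) s).1 ∧
        Rect (cs.foldl (fun s rc => rsStep s rc.1 rc.2) s).1 := by
  induction cs with
  | nil => exact fun s hs => ⟨Reach.refl _, hs⟩
  | cons rc cs ih =>
    intro s hs
    simp only [List.foldl_cons]
    by_cases h1 : cell s.1 rc.1 rc.2 = true
    · by_cases h2 : hrlP s.1 rc.1 rc.2 < 2 ∨ vrlP s.1 rc.1 rc.2 < 2
      · have hok : okB s.1 rc.1 rc.2 = false := (bad_iff s.1 hs rc.1 rc.2 h1).mp h2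
        have hstep : rsStep s rc.1 rc.2 = (setCell s.1 rc.1 rc.2 false, true) := by
          unfold rsStep; rw [if_pos h1, if_pos h2]
        rw [hstep]
        have hR' : Rect (setCell s.1 rc.1 rc.2 false) := rect_setCell hs rc.1 rc.2 false
        rcases ih (setCell s.1 rc.1 rc.2 false, true) hR' with ⟨hre, hrect⟩
        exact ⟨Reach.step h1 hok hre, hrect⟩
      · have hstep : rsStep s rc.1 rc.2 = s := by
          unfold rsStep; rw [if_pos h1, if_neg h2]
        rw [hstep]; exact ih s hs
    · have hstep : rsStep s rc.1 rc.2 = s := by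
        unfold rsStep; rw [if_neg h1]
      rw [hstep]; exact ih s hs

theorem rsFold_snd_mono (cs : List (Nat × Nat)) :
    ∀ s : List (List Bool) × Bool, s.2 = true →
      (cs.foldl (fun s rc => rsStep s rc.1 rc.2) s).2 = true := by
  induction cs with
  | nil => exact fun s h => h
  | cons rc cs ih =>
    intro s h
    simp only [List.foldl_cons]
    apply ih
    unfold rsStep
    split_ifs <;> simp [h]

theorem rsFold_nochange (cs : List (Nat × Nat)) :
    ∀ g : List (List Bool), (cs.foldl (fun s rc => rsStep s rc.1 rc.2) (g, false)).2 = false →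
      (cs.foldl (fun s rc => rsStep s rc.1 rc.2) (g, false)).1 = g ∧
        ∀ rc ∈ cs, ¬(cell g rc.1 rc.2 = true ∧
          (hrlP g rc.1 rc.2 < 2 ∨ vrlP g rc.1 rc.2 < 2)) := by
  induction cs with
  | nil => exact fun g _ => ⟨rfl, by simp⟩
  | cons rc cs ih =>
    intro g hsnd
    simp only [List.foldl_cons] at hsnd ⊢
    by_cases hbad : cell g rc.1 rc.2 = true ∧ (hrlP g rc.1 rc.2 < 2 ∨ vrlP g rc.1 rc.2 < 2)
    · exfalso
      have hstep : rsStep (g, false) rc.1 rc.2 = (setCell g rc.1 rc.2 false, true) := by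
        unfold rsStep; rw [if_pos hbad.1, if_pos hbad.2]
      rw [hstep] at hsnd
      rw [rsFold_snd_mono cs _ rfl] at hsnd
      cases hsnd
    · have hstep : rsStep (g, false) rc.1 rc.2 = (g, false) := by
        unfold rsStep
        split_ifs with h1 h2
        · exact absurd ⟨h1, h2⟩ hbad
        · rfl
        · rfl
      rw [hstep] at hsnd ⊢
      rcases ih g hsnd with ⟨e1, e2⟩
      refine ⟨e1, ?_⟩
      intro x hx
      rcases List.mem_cons.mp hx with hx | hx
      · rw [hx]; exact hbad
      · exact e2 x hx

def ZP (g : List (List Bool)) : Prop := ∀ r c, cell g r c = true → 1 ≤ r ∧ 1 ≤ c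

theorem mem_cellsA (g : List (List Bool)) (hRect : Rect g) (hZ : ZP g) (r c : Nat)
    (h : cell g r c = true) : (r, c) ∈ cellsA g := by
  rcases cell_true_lt g r c h with ⟨h1, h2⟩
  rcases hZ r c h with ⟨h3, h4⟩
  have h5 : c < (g.headD []).length := by rw [← hRect r h1]; exact h2
  simp only [cellsA, rngN, List.mem_flatMap, List.mem_map, List.mem_range'_1]
  exact ⟨r, ⟨h3, by omega⟩, c, ⟨h4, by omega⟩, rfl⟩

theorem rsLoop_spec : ∀ g : List (List Bool), Rect g → ZP g →
    Reach g (rsLoop g) ∧ StableG (rsLoop g) := by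
  intro g
  induction g using rsLoop.induct with
  | case1 g =>
    rename_i hp ih
    intro hR hZ
    have hfold := rsFold_reach (cellsA g) (g, false) hR
    rw [← rsPass_eq] at hfold
    rcases hfold with ⟨hre, hrect⟩
    have hZ' : ZP (rsPass g).1 := fun r c hc => hZ r c (reach_sub hre r c hc)
    rcases ih hrect hZ' with ⟨hre2, hst⟩
    have e : rsLoop g = rsLoop (rsPass g).1 := by rw [rsLoop]; exact dif_pos hp
    rw [e]
    exact ⟨reach_trans hre hre2, hst⟩
  | case2 g =>
    rename_i hp
    intro hR hZ
    have hp' : (rsPass g).2 = false := by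
      cases h : (rsPass g).2
      · rfl
      · exact absurd h hp
    have e : rsLoop g = (rsPass g).1 := by rw [rsLoop]; exact dif_neg hp
    have hnc := rsFold_nochange (cellsA g) g (by rw [← rsPass_eq]; exact hp')
    rw [← rsPass_eq] at hnc
    rcases hnc with ⟨e1, e2⟩
    rw [e, e1]
    refine ⟨Reach.refl g, ?_⟩
    intro r c hc
    cases hok : okB g r c
    · exfalso
      have hbad := (bad_iff g hR r c hc).mpr hok
      exact e2 (r, c) (mem_cellsA g hR hZ r c hc) ⟨hc, hbad⟩
    · rfl

-- ===== phase 1: construction =====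
theorem mapRange_getD {α : Type} (n i : Nat) (f : Nat → α) (d : α) :
    ((List.range n).map f).getD i d = if i < n then f i else d := by
  by_cases h : i < n
  · rw [List.getD_eq_getElem _ _ (by simpa using h)]
    simp [h]
  · have e : ((List.range n).map f).getD i d = d := by
      apply List.getD_eq_default
      simpa using Nat.le_of_not_lt h
    rw [e, if_neg h]

theorem shape_foldl_setCell (b : Bool) (ps : List (Nat × Nat)) :
    ∀ g : List (List Bool),
      (ps.foldl (fun g rc => setCell g rc.1 rc.2 b) g).length = g.length ∧
      ∀ r, ((ps.foldl (fun g rc => setCell g rc.1 rc.2 b) g).getD r []).length =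
        (g.getD r []).length := by
  induction ps with
  | nil => exact fun g => ⟨rfl, fun _ => rfl⟩
  | cons p ps ih =>
    intro g
    simp only [List.foldl_cons]
    rcases ih (setCell g p.1 p.2 b) with ⟨h1, h2⟩
    exact ⟨h1.trans (length_setCell _ _ _ _),
      fun r => (h2 r).trans (rowlen_setCell _ _ _ _ _)⟩

theorem cell_foldl_setCell (b : Bool) (ps : List (Nat × Nat)) :
    ∀ (g : List (List Bool)) (r c : Nat),
      cell (ps.foldl (fun g rc => setCell g rc.1 rc.2 b) g) r c =
        if (r, c) ∈ ps ∧ r < g.length ∧ c < (g.getD r []).length then b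
        else cell g r c := by
  induction ps with
  | nil => simp
  | cons p ps ih =>
    intro g r c
    simp only [List.foldl_cons]
    rw [ih, length_setCell, rowlen_setCell, cell_setCell]
    by_cases hin : r < g.length ∧ c < (g.getD r []).length
    · by_cases hmem : (r, c) ∈ ps
      · rw [if_pos ⟨hmem, hin⟩, if_pos ⟨List.mem_cons_of_mem _ hmem, hin⟩]
      · rw [if_neg (by tauto)]
        by_cases hp : (r, c) = p
        · have e1 : p.1 = r := by rw [← hp]
          have e2 : p.2 = c := by rw [← hp]
          rw [if_pos ⟨e1.symm, e2.symm, by rw [e1]; exact hin.1, by rw [e1, e2]; exact hin.2⟩]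
          rw [if_pos ⟨by rw [hp]; exact List.mem_cons_self, hin⟩]
        · rw [if_neg (by
            rintro ⟨e1, e2, _, _⟩
            exact hp (by rw [e1, e2, Prod.mk.eta]))]
          rw [if_neg (by
            rintro ⟨hm, _⟩
            rcases List.mem_cons.mp hm with hm | hm
            · exact hp hm
            · exact hmem hm)]
    · have hA : ¬((r, c) ∈ ps ∧ r < g.length ∧ c < (g.getD r []).length) := by tauto
      have hB : ¬(r = p.1 ∧ c = p.2 ∧ p.1 < g.length ∧ p.2 < (g.getD p.1 []).length) := by
        rintro ⟨e1, e2, e3, e4⟩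
        subst e1; subst e2
        exact hin ⟨e3, e4⟩
      have hC : ¬((r, c) ∈ p :: ps ∧ r < g.length ∧ c < (g.getD r []).length) := by tauto
      rw [if_neg hA, if_neg hB, if_neg hC]

theorem foldl_ite_filter {α β : Type} (p : α → Prop) [DecidablePred p] (f : β → α → β)
    (l : List α) : ∀ init : β,
    l.foldl (fun s a => if p a then f s a else s) init =
      (l.filter (fun a => decide (p a))).foldl f init := by
  induction l with
  | nil => intro init; rfl
  | cons a l ih =>
    intro init
    by_cases h : p a <;> simp [h, ih]

theorem mem_prodList {rs cs : List Nat} {r c : Nat} :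
    (r, c) ∈ rs.flatMap (fun r => cs.map (fun c => (r, c))) ↔ r ∈ rs ∧ c ∈ cs := by
  simp only [List.mem_flatMap, List.mem_map, Prod.mk.injEq]
  constructor
  · rintro ⟨a, ha, b, hb, e1, e2⟩
    subst e1; subst e2; exact ⟨ha, hb⟩
  · rintro ⟨ha, hb⟩
    exact ⟨r, ha, c, hb, rfl, rfl⟩

theorem foldl_nested_swap {γ : Type} (f : γ → Nat → Nat → γ) (cs rs : List Nat) (init : γ) :
    cs.foldl (fun s c => rs.foldl (fun s r => f s r c) s) init
      = (cs.flatMap (fun c => rs.map (fun r => (r, c)))).foldl (fun s rc => f s rc.1 rc.2) init := by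
  induction cs generalizing init with
  | nil => simp
  | cons c cs ih =>
    simp only [List.foldl_cons, List.flatMap_cons, List.foldl_append, ih, List.foldl_map]

theorem mem_prodList_swap {cs rs : List Nat} {r c : Nat} :
    (r, c) ∈ cs.flatMap (fun c => rs.map (fun r => (r, c))) ↔ c ∈ cs ∧ r ∈ rs := by
  simp only [List.mem_flatMap, List.mem_map, Prod.mk.injEq]
  constructor
  · rintro ⟨a, ha, b, hb, e1, e2⟩
    subst e1; subst e2; exact ⟨ha, hb⟩
  · rintro ⟨ha, hb⟩
    exact ⟨c, ha, r, hb, rfl, rfl⟩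

def ps_fill (rows cols : Int) : List (Nat × Nat) :=
  (rngN 1 rows.toNat).flatMap (fun r => (rngN 1 cols.toNat).map (fun c => (r, c)))
def ps_brow (rows cols : Int) : List (Nat × Nat) :=
  ((rngN 2 rows.toNat).filter (fun r => decide ((r - 1) % 4 = 0))).flatMap
    (fun r => (rngN 2 cols.toNat).map (fun c => (r, c)))
def ps_bcol (rows cols : Int) : List (Nat × Nat) :=
  ((rngN 2 cols.toNat).filter (fun c => decide ((c - 1) % 4 = 0))).flatMap
    (fun c => (rngN 2 rows.toNat).map (fun r => (r, c)))

theorem fill_eq (rows cols : Int) (g : List (List Bool)) :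
    pyFillInterior rows cols g = (ps_fill rows cols).foldl (fun g rc => setCell g rc.1 rc.2 true) g := by
  unfold pyFillInterior ps_fill
  exact foldl_nested (fun g r c => setCell g r c true) _ _ g

theorem brow_eq (rows cols : Int) (g : List (List Bool)) :
    pyBandRows rows cols g = (ps_brow rows cols).foldl (fun g rc => setCell g rc.1 rc.2 false) g := by
  unfold pyBandRows ps_brow
  rw [foldl_ite_filter (fun r => (r - 1) % 4 = 0)
    (fun g r => (rngN 2 cols.toNat).foldl (fun g c => setCell g r c false) g)]
  exact foldl_nested (fun g r c => setCell g r c false) _ _ g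

theorem bcol_eq (rows cols : Int) (g : List (List Bool)) :
    pyBandCols rows cols g = (ps_bcol rows cols).foldl (fun g rc => setCell g rc.1 rc.2 false) g := by
  unfold pyBandCols ps_bcol
  rw [foldl_ite_filter (fun c => (c - 1) % 4 = 0)
    (fun g c => (rngN 2 rows.toNat).foldl (fun g r => setCell g r c false) g)]
  exact foldl_nested_swap (fun g r c => setCell g r c false) _ _ g

theorem mem_ps_fill {rows cols : Int} {r c : Nat} :
    (r, c) ∈ ps_fill rows cols ↔ 1 ≤ r ∧ r < rows.toNat ∧ 1 ≤ c ∧ c < cols.toNat := by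
  unfold ps_fill
  rw [mem_prodList]
  simp only [rngN, List.mem_range'_1]
  omega

theorem mem_ps_brow {rows cols : Int} {r c : Nat} :
    (r, c) ∈ ps_brow rows cols ↔
      2 ≤ r ∧ r < rows.toNat ∧ (r - 1) % 4 = 0 ∧ 2 ≤ c ∧ c < cols.toNat := by
  unfold ps_brow
  rw [mem_prodList]
  simp only [List.mem_filter, rngN, List.mem_range'_1, decide_eq_true_eq]
  omega

theorem mem_ps_bcol {rows cols : Int} {r c : Nat} :
    (r, c) ∈ ps_bcol rows cols ↔
      2 ≤ c ∧ c < cols.toNat ∧ (c - 1) % 4 = 0 ∧ 2 ≤ r ∧ r < rows.toNat := by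
  unfold ps_bcol
  rw [mem_prodList_swap]
  simp only [List.mem_filter, rngN, List.mem_range'_1, decide_eq_true_eq]
  omega

theorem length_pyBuild (rows cols : Int) : (pyBuild rows cols).length = rows.toNat := by
  simp [pyBuild]

theorem rowlen_pyBuild (rows cols : Int) (r : Nat) :
    ((pyBuild rows cols).getD r []).length = if r < rows.toNat then cols.toNat else 0 := by
  unfold pyBuild
  rw [mapRange_getD]
  split_ifs <;> simp

theorem cell_pyBuild (rows cols : Int) (r c : Nat) : cell (pyBuild rows cols) r c = false := by
  unfold cell pyBuild
  rw [mapRange_getD]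
  split_ifs with h
  · rw [mapRange_getD]
    split_ifs <;> rfl
  · rfl

theorem phase1_eq (rows cols : Int) :
    (if rows > 6 ∧ cols > 6 then
        pyBandCols rows cols (pyBandRows rows cols (pyFillInterior rows cols (pyBuild rows cols)))
      else pyFillInterior rows cols (pyBuild rows cols)) = bGrid1 rows cols := by
  have hb1 : (pyFillInterior rows cols (pyBuild rows cols)).length = rows.toNat := by
    rw [fill_eq, (shape_foldl_setCell true _ _).1, length_pyBuild]
  have hb2 : ∀ r, ((pyFillInterior rows cols (pyBuild rows cols)).getD r []).length =
      if r < rows.toNat then cols.toNat else 0 := by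
    intro r
    rw [fill_eq, (shape_foldl_setCell true _ _).2 r, rowlen_pyBuild]
  have hc1 : ∀ g r c, cell (pyFillInterior rows cols g) r c =
      if (r, c) ∈ ps_fill rows cols ∧ r < g.length ∧ c < (g.getD r []).length then true
      else cell g r c := by
    intro g r c
    rw [fill_eq, cell_foldl_setCell]
  have hbandlen1 : (pyBandRows rows cols (pyFillInterior rows cols (pyBuild rows cols))).length
      = rows.toNat := by
    rw [brow_eq, (shape_foldl_setCell false _ _).1, hb1]
  have hbandlen2 : ∀ r, ((pyBandRows rows cols (pyFillInterior rows cols (pyBuild rows cols))).getD r []).length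
      = if r < rows.toNat then cols.toNat else 0 := by
    intro r
    rw [brow_eq, (shape_foldl_setCell false _ _).2 r, hb2]
  have hglen : (bGrid1 rows cols).length = rows.toNat := by simp [bGrid1]
  have hgrow : ∀ r, ((bGrid1 rows cols).getD r []).length =
      if r < rows.toNat then cols.toNat else 0 := by
    intro r
    unfold bGrid1
    rw [mapRange_getD]
    split_ifs <;> simp
  have hRHS : ∀ r c, cell (bGrid1 rows cols) r c =
      if r < rows.toNat ∧ c < cols.toNat then
        filledB (decide (rows > 6) && decide (cols > 6)) r c else false := by
    intro r c
    unfold cell bGrid1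
    rw [mapRange_getD]
    by_cases h1 : r < rows.toNat
    · rw [if_pos h1, mapRange_getD]
      by_cases h2 : c < cols.toNat
      · rw [if_pos h2, if_pos ⟨h1, h2⟩]
      · rw [if_neg h2, if_neg (by tauto)]
    · rw [if_neg h1, if_neg (by tauto)]
      rfl
  apply grid_ext
  · constructor
    · by_cases hB : rows > 6 ∧ cols > 6
      · rw [if_pos hB, hglen, bcol_eq, (shape_foldl_setCell false _ _).1, hbandlen1]
      · rw [if_neg hB, hglen, hb1]
    · intro r
      by_cases hB : rows > 6 ∧ cols > 6
      · rw [if_pos hB, hgrow, bcol_eq, (shape_foldl_setCell false _ _).2 r, hbandlen2]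
      · rw [if_neg hB, hgrow, hb2]
  · intro r c
    rw [hRHS]
    by_cases hB : rows > 6 ∧ cols > 6
    · rw [if_pos hB, bcol_eq, cell_foldl_setCell, hbandlen1, hbandlen2, brow_eq,
        cell_foldl_setCell, hb1, hb2, hc1, cell_pyBuild, length_pyBuild, rowlen_pyBuild]
      simp only [mem_ps_bcol, mem_ps_brow, mem_ps_fill]
      unfold filledB
      simp only [hB.1, hB.2, decide_true, Bool.true_and, Bool.and_eq_true, Bool.or_eq_true,
        decide_eq_true_eq]
      split_ifs <;> first | rfl | omega
    · rw [if_neg hB, hc1, cell_pyBuild, length_pyBuild, rowlen_pyBuild]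
      simp only [mem_ps_fill]
      have hbF : (decide (rows > 6) && decide (cols > 6)) = false := by
        rcases not_and_or.mp hB with h | h <;> simp [h]
      rw [hbF]
      unfold filledB
      simp only [Bool.false_and, Bool.and_eq_true, Bool.or_eq_true, decide_eq_true_eq]
      split_ifs <;> first | rfl | omega

-- ===== phase 2: run capping =====
theorem capRun_length : ∀ (run : Nat) (l : List Bool), (capRun run l).length = l.length := by
  intro run l
  induction l generalizing run with
  | nil => rfl
  | cons v t ih =>
    unfold capRun
    split_ifs <;> simp [ih]

theorem getD_set_g {α : Type} (g : List α) (i : Nat) (v d : α) (r : Nat) :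
    (g.set i v).getD r d = if r = i ∧ i < g.length then v else g.getD r d := by
  by_cases hi : i < g.length
  · by_cases he : r = i
    · subst he
      simp [hi, List.getD_eq_getElem?_getD, List.getElem?_set_self, List.getElem?_eq_getElem hi]
    · simp [he, List.getD_eq_getElem?_getD, List.getElem?_set_ne (Ne.symm he)]
  · simp [List.set_eq_of_length_le (by omega : g.length ≤ i), hi]

theorem set_getD_self_grid (g : List (List Bool)) (r : Nat) : g.set r (g.getD r []) = g := by
  by_cases hr : r < g.length
  · rw [List.getD_eq_getElem _ _ hr, List.set_getElem_self]
  · exact List.set_eq_of_length_le (by omega)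

theorem take_set_self {α : Type} (l : List α) (i : Nat) (a : α) :
    (l.set i a).take i = l.take i := by
  rw [List.take_set]
  exact List.set_eq_of_length_le (by simp [Nat.min_le_left])

theorem take_succ_set {α : Type} (l : List α) (i : Nat) (a : α) (hi : i < l.length) :
    (l.set i a).take (i + 1) = l.take i ++ [a] := by
  rw [List.take_succ, take_set_self]
  have : (l.set i a)[i]? = some a := by
    rw [List.getElem?_set_self]
    simp [hi]
  rw [this]
  rfl

theorem take_succ_getElem {α : Type} (l : List α) (i : Nat) (hi : i < l.length) :
    l.take (i + 1) = l.take i ++ [l[i]] := by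
  rw [List.take_succ, List.getElem?_eq_getElem hi]
  rfl

theorem capRun_cons (run : Nat) (v : Bool) (t : List Bool) :
    capRun run (v :: t) = if v then (if run + 1 > 9 then false :: capRun 0 t
      else true :: capRun (run + 1) t) else false :: capRun 0 t := rfl

theorem rowInner (r : Nat) : ∀ (k : Nat) (g : List (List Bool)) (i run : Nat),
    i + k = (g.getD r []).length → r < g.length →
    ((List.range' i k).foldl (fun s c => enfStep s r c) (g, run)).1
      = g.set r ((g.getD r []).take i ++ capRun run ((g.getD r []).drop i)) := by
  intro k
  induction k with
  | zero =>
    intro g i run hlen hr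
    simp only [List.range', List.foldl_nil]
    rw [List.take_of_length_le (by omega), List.drop_of_length_le (by omega)]
    simp only [capRun, List.append_nil]
    rw [set_getD_self_grid]
  | succ k ih =>
    intro g i run hlen hr
    rw [List.range'_succ]
    simp only [List.foldl_cons]
    have hi : i < (g.getD r []).length := by omega
    have hcell : cell g r i = (g.getD r [])[i] := by
      rw [cell, List.getD_eq_getElem _ _ hi]
    have hdrop : (g.getD r []).drop i = (g.getD r [])[i] :: (g.getD r []).drop (i + 1) :=
      List.drop_eq_getElem_cons hi
    cases hv : (g.getD r [])[i] with
    | false =>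
      have hstep : enfStep (g, run) r i = (g, 0) := by
        unfold enfStep
        rw [hcell, hv]
        rfl
      rw [hstep, ih g (i + 1) 0 (by omega) hr]
      congr 1
      rw [hdrop, hv, capRun_cons, if_neg (by simp), take_succ_getElem _ _ hi, hv,
        List.append_assoc, List.singleton_append]
    | true =>
      by_cases hrun : run + 1 > 9
      · have hstep : enfStep (g, run) r i = (setCell g r i false, 0) := by
          unfold enfStep
          rw [hcell, hv, if_pos rfl, if_pos hrun]
        rw [hstep]
        have hrow' : (setCell g r i false).getD r [] = (g.getD r []).set i false := by
          rw [getD_row_setCell, if_pos ⟨rfl, hr⟩]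
        have hlen' : (i + 1) + k = ((setCell g r i false).getD r []).length := by
          rw [hrow', List.length_set]
          omega
        have hr' : r < (setCell g r i false).length := by
          rw [length_setCell]; exact hr
        rw [ih _ (i + 1) 0 hlen' hr', hrow']
        rw [take_succ_set _ _ _ hi, List.drop_set_of_lt (by omega)]
        have hset : setCell g r i false = g.set r ((g.getD r []).set i false) := rfl
        rw [hset, List.set_set]
        congr 1
        rw [hdrop, hv, capRun_cons, if_pos rfl, if_pos hrun,
          List.append_assoc, List.singleton_append]
      · have hstep : enfStep (g, run) r i = (g, run + 1) := by
          unfold enfStep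
          rw [hcell, hv, if_pos rfl, if_neg hrun]
        rw [hstep, ih g (i + 1) (run + 1) (by omega) hr]
        congr 1
        rw [hdrop, hv, capRun_cons, if_pos rfl, if_neg hrun, take_succ_getElem _ _ hi, hv,
          List.append_assoc, List.singleton_append]

theorem rowOuter (C : Nat) : ∀ (k : Nat) (g : List (List Bool)) (i : Nat),
    i + k = g.length → (∀ r, r < g.length → (g.getD r []).length = C) →
    (List.range' i k).foldl
        (fun g r => ((List.range' 0 C).foldl (fun s c => enfStep s r c) (g, 0)).1) g
      = g.take i ++ (g.drop i).map capRow := by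
  intro k
  induction k with
  | zero =>
    intro g i hlen _
    simp only [List.range', List.foldl_nil]
    rw [List.drop_of_length_le (by omega), List.take_of_length_le (by omega)]
    simp
  | succ k ih =>
    intro g i hlen hrow
    rw [List.range'_succ]
    simp only [List.foldl_cons]
    have hi : i < g.length := by omega
    have hinner : ((List.range' 0 C).foldl (fun s c => enfStep s i c) (g, 0)).1
        = g.set i (capRow (g.getD i [])) := by
      rw [rowInner i C g 0 0 (by rw [hrow i hi]; omega) hi]
      simp [capRow]
    rw [hinner]
    have hg2len : (g.set i (capRow (g.getD i []))).length = g.length := by simp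
    have hg2row : ∀ r, r < (g.set i (capRow (g.getD i []))).length →
        ((g.set i (capRow (g.getD i []))).getD r []).length = C := by
      intro r hr
      rw [getD_set_g]
      split_ifs with h
      · rw [capRow, capRun_length]
        exact hrow i hi
      · exact hrow r (by rwa [hg2len] at hr)
    rw [ih _ (i + 1) (by omega) hg2row]
    rw [take_succ_set _ _ _ hi, List.drop_set_of_lt (by omega)]
    have hdrop : g.drop i = g[i] :: g.drop (i + 1) := List.drop_eq_getElem_cons hi
    rw [hdrop]
    simp only [List.map_cons]
    rw [List.getD_eq_getElem _ _ hi]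
    simp

theorem enforceRows_eq (g : List (List Bool)) (hR : Rect g) : enforceRows g = bCapRows g := by
  unfold enforceRows bCapRows
  show (List.range g.length).foldl
      (fun g' r => ((List.range ((g.headD []).length)).foldl (fun s c => enfStep s r c) (g', 0)).1) g
    = g.map capRow
  simp only [List.range_eq_range']
  rw [rowOuter ((g.headD []).length) g.length g 0 (by omega) (fun r hr => hR r hr)]
  simp

def colB (g : List (List Bool)) (c : Nat) : List Bool :=
  (List.range g.length).map (fun r => cell g r c)

def colOpC (c : Nat) (g : List (List Bool)) : List (List Bool) :=
  List.zipWith (fun row v => row.set c v) g (capRow (colB g c))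

theorem colB_length (g : List (List Bool)) (c : Nat) : (colB g c).length = g.length := by
  simp [colB]

theorem colB_getElem (g : List (List Bool)) (c r : Nat) (hr : r < g.length) :
    (colB g c)[r]'(by rw [colB_length]; exact hr) = cell g r c := by
  simp [colB]

theorem set_of_getD (l : List Bool) (c : Nat) (b : Bool) (h : l.getD c false = b) :
    l.set c b = l := by
  by_cases hc : c < l.length
  · rw [← h, List.getD_eq_getElem _ _ hc, List.set_getElem_self]
  · exact List.set_eq_of_length_le (by omega)

theorem capRun_getD_false : ∀ (l : List Bool) (run j : Nat), l.getD j false = false →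
    (capRun run l).getD j false = false := by
  intro l
  induction l with
  | nil => intro run j _; simp [capRun]
  | cons v t ih =>
    intro run j hj
    rw [capRun_cons]
    cases j with
    | zero =>
      simp [List.getD] at hj
      subst hj
      simp [List.getD]
    | succ j =>
      simp only [List.getD_cons_succ] at hj
      split_ifs <;> simp only [List.getD_cons_succ] <;> exact ih _ j hj

theorem capRun_getD_true : ∀ (l : List Bool) (run j : Nat),
    (capRun run l).getD j false = true → l.getD j false = true := by
  intro l
  induction l with
  | nil => intro run j h; simp [capRun] at h
  | cons v t ih =>
    intro run j h
    rw [capRun_cons] at h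
    cases j with
    | zero =>
      split_ifs at h with h1 h2
      · simp [List.getD] at h
      · simp [List.getD, h1]
      · simp [List.getD] at h
    | succ j =>
      simp only [List.getD_cons_succ]
      split_ifs at h with h1 h2 <;> simp only [List.getD_cons_succ] at h <;> exact ih _ j h

theorem colB_drop_setCell (g : List (List Bool)) (i c j : Nat) (hij : i < j) :
    (colB (setCell g i c false) c).drop j = (colB g c).drop j := by
  apply List.ext_getElem
  · simp [colB, length_setCell]
  · intro n h1 h2
    rw [List.getElem_drop, List.getElem_drop]
    have hn1 : j + n < (setCell g i c false).length := by
      simp only [List.length_drop, colB_length, length_setCell] at h1 ⊢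
      omega
    have hn2 : j + n < g.length := by rwa [length_setCell] at hn1
    rw [colB_getElem _ _ _ hn1, colB_getElem _ _ _ hn2, cell_setCell]
    rw [if_neg (by rintro ⟨e, _⟩; omega)]

theorem colInner (c : Nat) : ∀ (k : Nat) (g : List (List Bool)) (i run : Nat),
    i + k = g.length →
    ((List.range' i k).foldl (fun s r => enfStep s r c) (g, run)).1
      = g.take i ++ List.zipWith (fun row v => row.set c v) (g.drop i)
          (capRun run ((colB g c).drop i)) := by
  intro k
  induction k with
  | zero =>
    intro g i run hlen
    simp only [List.range', List.foldl_nil]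
    rw [List.drop_of_length_le (by omega), List.take_of_length_le (by omega)]
    simp
  | succ k ih =>
    intro g i run hlen
    rw [List.range'_succ]
    simp only [List.foldl_cons]
    have hi : i < g.length := by omega
    have hib : i < (colB g c).length := by rw [colB_length]; exact hi
    have hcol : (colB g c).drop i = cell g i c :: (colB g c).drop (i + 1) := by
      rw [List.drop_eq_getElem_cons hib, colB_getElem _ _ _ hi]
    have hgdrop : g.drop i = g[i] :: g.drop (i + 1) := List.drop_eq_getElem_cons hi
    cases hv : cell g i c with
    | false =>
      have hstep : enfStep (g, run) i c = (g, 0) := by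
        unfold enfStep
        rw [hv]
        rfl
      rw [hstep, ih g (i + 1) 0 (by omega)]
      rw [hcol, hv, capRun_cons, if_neg (by simp), hgdrop]
      rw [List.zipWith_cons_cons]
      have hhead : g[i].set c false = g[i] := by
        apply set_of_getD
        rw [cell, List.getD_eq_getElem _ _ hi] at hv
        exact hv
      rw [hhead, take_succ_getElem _ _ hi, List.append_assoc, List.singleton_append]
    | true =>
      by_cases hrun : run + 1 > 9
      · have hstep : enfStep (g, run) i c = (setCell g i c false, 0) := by
          unfold enfStep
          rw [hv, if_pos rfl, if_pos hrun]
        rw [hstep]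
        have hlen' : (i + 1) + k = (setCell g i c false).length := by
          rw [length_setCell]; omega
        rw [ih _ (i + 1) 0 hlen']
        have hset : setCell g i c false = g.set i (g[i].set c false) := by
          unfold setCell
          rw [List.getD_eq_getElem _ _ hi]
        rw [colB_drop_setCell g i c (i + 1) (by omega)]
        rw [hset, take_succ_set _ _ _ hi, List.drop_set_of_lt (by omega)]
        rw [hcol, hv, capRun_cons, if_pos rfl, if_pos hrun, hgdrop, List.zipWith_cons_cons]
        rw [List.append_assoc, List.singleton_append]
      · have hstep : enfStep (g, run) i c = (g, run + 1) := by
          unfold enfStep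
          rw [hv, if_pos rfl, if_neg hrun]
        rw [hstep, ih g (i + 1) (run + 1) (by omega)]
        rw [hcol, hv, capRun_cons, if_pos rfl, if_neg hrun, hgdrop, List.zipWith_cons_cons]
        have hhead : g[i].set c true = g[i] := by
          apply set_of_getD
          rw [cell, List.getD_eq_getElem _ _ hi] at hv
          exact hv
        rw [hhead, take_succ_getElem _ _ hi, List.append_assoc, List.singleton_append]

theorem length_colOpC (c : Nat) (g : List (List Bool)) : (colOpC c g).length = g.length := by
  simp [colOpC, capRow, capRun_length, colB_length]

theorem getD_colOpC (c : Nat) (g : List (List Bool)) (r : Nat) :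
    (colOpC c g).getD r [] =
      if hr : r < g.length then g[r].set c ((capRow (colB g c)).getD r false) else [] := by
  split_ifs with hr
  · have hr2 : r < (colOpC c g).length := by rw [length_colOpC]; exact hr
    rw [List.getD_eq_getElem _ _ hr2]
    unfold colOpC
    rw [List.getElem_zipWith]
    congr 1
    rw [List.getD_eq_getElem _ _ (by rw [capRow, capRun_length, colB_length]; exact hr)]
  · apply List.getD_eq_default
    rw [length_colOpC]
    omega

theorem rowlen_colOpC (c : Nat) (g : List (List Bool)) (r : Nat) :
    ((colOpC c g).getD r []).length = (g.getD r []).length := by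
  rw [getD_colOpC]
  split_ifs with hr
  · rw [List.length_set, List.getD_eq_getElem _ _ hr]
  · rw [List.getD_eq_default _ _ (by omega : g.length ≤ r)]

theorem cell_colOpC (c : Nat) (g : List (List Bool)) (r c' : Nat) :
    cell (colOpC c g) r c' =
      if c' = c then (capRow (colB g c)).getD r false else cell g r c' := by
  unfold cell
  rw [getD_colOpC]
  split_ifs with hr he he
  · subst he
    rw [getD_set_row]
    by_cases hc : c' < g[r].length
    · rw [if_pos ⟨rfl, hc⟩]
    · rw [if_neg (by tauto)]
      have h1 : g[r].getD c' false = false := List.getD_eq_default _ _ (by omega)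
      have h3 : (colB g c').getD r false = false := by
        rw [List.getD_eq_getElem _ _ (by rw [colB_length]; exact hr),
          colB_getElem _ _ _ hr, cell, List.getD_eq_getElem _ _ hr]
        exact h1
      rw [capRow, capRun_getD_false _ _ _ h3]
      exact h1
  · rw [getD_set_row, if_neg (by tauto), List.getD_eq_getElem _ _ hr]
  · subst he
    have h1 : (capRow (colB g c')).getD r false = false := by
      apply List.getD_eq_default
      rw [capRow, capRun_length, colB_length]
      omega
    rw [h1]
    rfl
  · have h2 : g.getD r [] = ([] : List Bool) := List.getD_eq_default _ _ (by omega)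
    rw [h2]

theorem colB_colOpC_ne (c c' : Nat) (g : List (List Bool)) (hne : c' ≠ c) :
    colB (colOpC c g) c' = colB g c' := by
  apply List.ext_getElem
  · simp [colB_length, length_colOpC]
  · intro n h1 h2
    rw [colB_length, length_colOpC] at h1
    rw [colB_getElem _ _ _ (by rw [length_colOpC]; exact h1), colB_getElem _ _ _ h1,
      cell_colOpC, if_neg hne]

theorem colFold (cs : List Nat) (hnd : cs.Nodup) :
    ∀ g : List (List Bool),
      ((cs.foldl (fun g c => colOpC c g) g).length = g.length ∧
        ∀ r, ((cs.foldl (fun g c => colOpC c g) g).getD r []).length = (g.getD r []).length) ∧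
      ∀ r c', cell (cs.foldl (fun g c => colOpC c g) g) r c' =
        if c' ∈ cs then (capRow (colB g c')).getD r false else cell g r c' := by
  induction cs with
  | nil => exact fun g => ⟨⟨rfl, fun _ => rfl⟩, fun r c' => by simp⟩
  | cons c cs ih =>
    intro g
    simp only [List.foldl_cons]
    rcases ih (List.Nodup.of_cons hnd) (colOpC c g) with ⟨⟨hl1, hl2⟩, hcell⟩
    refine ⟨⟨hl1.trans (length_colOpC c g), fun r => (hl2 r).trans (rowlen_colOpC c g r)⟩, ?_⟩
    intro r c'
    rw [hcell]
    by_cases hmem : c' ∈ cs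
    · have hne : c' ≠ c := fun e => (List.nodup_cons.mp hnd).1 (e ▸ hmem)
      rw [if_pos hmem, if_pos (List.mem_cons_of_mem _ hmem), colB_colOpC_ne _ _ _ hne]
    · rw [if_neg hmem, cell_colOpC]
      by_cases he : c' = c
      · subst he
        rw [if_pos rfl, if_pos (List.mem_cons_self)]
      · rw [if_neg he, if_neg (by
          intro hm
          rcases List.mem_cons.mp hm with hm | hm
          · exact he hm
          · exact hmem hm)]

theorem enforceCols_eq_fold (R : Nat) (cs : List Nat) :
    ∀ g : List (List Bool), g.length = R →
    cs.foldl (fun g c => ((List.range' 0 R).foldl (fun s r => enfStep s r c) (g, 0)).1) g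
      = cs.foldl (fun g c => colOpC c g) g := by
  induction cs with
  | nil => intro g _; rfl
  | cons c cs ih =>
    intro g hlen
    simp only [List.foldl_cons]
    have hinner : ((List.range' 0 R).foldl (fun s r => enfStep s r c) (g, 0)).1 = colOpC c g := by
      rw [colInner c R g 0 0 (by omega)]
      simp [colOpC, capRow]
    rw [hinner]
    exact ih (colOpC c g) (by rw [length_colOpC]; exact hlen)

theorem cell_bCapCols (g : List (List Bool)) (r c : Nat) :
    cell (bCapCols g) r c =
      if r < g.length ∧ c < (g.headD []).length then (capRow (colB g c)).getD r false
      else false := by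
  unfold cell bCapCols colB
  simp only []
  rw [mapRange_getD]
  by_cases h1 : r < g.length
  · rw [if_pos h1, mapRange_getD]
    by_cases h2 : c < (g.headD []).length
    · rw [if_pos h2, if_pos ⟨h1, h2⟩, mapRange_getD, if_pos h2]
    · rw [if_neg h2, if_neg (by tauto)]
  · rw [if_neg h1, if_neg (by tauto)]
    rfl

theorem enforceCols_eq (g : List (List Bool)) (hR : Rect g) : enforceCols g = bCapCols g := by
  unfold enforceCols
  show (List.range ((g.headD []).length)).foldl
      (fun g' c => ((List.range g.length).foldl (fun s r => enfStep s r c) (g', 0)).1) g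
    = bCapCols g
  simp only [List.range_eq_range']
  rw [enforceCols_eq_fold g.length _ g rfl]
  rcases colFold (List.range' 0 ((g.headD []).length)) (List.nodup_range') g with ⟨⟨hl1, hl2⟩, hcell⟩
  apply grid_ext
  · constructor
    · rw [hl1]
      unfold bCapCols
      simp
    · intro r
      rw [hl2 r]
      unfold bCapCols
      simp only []
      rw [mapRange_getD]
      by_cases h1 : r < g.length
      · rw [if_pos h1, hR r h1]
        simp
      · rw [if_neg h1, List.getD_eq_default _ _ (by omega : g.length ≤ r)]
  · intro r c
    rw [hcell, cell_bCapCols]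
    have hmem : c ∈ List.range' 0 ((g.headD []).length) ↔ c < (g.headD []).length := by
      rw [List.mem_range'_1]
      omega
    by_cases hc : c < (g.headD []).length
    · rw [if_pos (hmem.mpr hc)]
      by_cases hr : r < g.length
      · rw [if_pos ⟨hr, hc⟩]
      · rw [if_neg (by tauto)]
        apply List.getD_eq_default
        rw [capRow, capRun_length, colB_length]
        omega
    · rw [if_neg (fun h => hc (hmem.mp h)), if_neg (by tauto)]
      by_cases hr : r < g.length
      · rw [cell, List.getD_eq_default _ _ (by rw [hR r hr]; omega)]
      · rw [cell, List.getD_eq_default _ _ (by omega : g.length ≤ r)]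
        rfl

theorem cell_bGrid1 (rows cols : Int) (r c : Nat) :
    cell (bGrid1 rows cols) r c =
      if r < rows.toNat ∧ c < cols.toNat then
        filledB (decide (rows > 6) && decide (cols > 6)) r c else false := by
  unfold cell bGrid1
  rw [mapRange_getD]
  by_cases h1 : r < rows.toNat
  · rw [if_pos h1, mapRange_getD]
    by_cases h2 : c < cols.toNat
    · rw [if_pos h2, if_pos ⟨h1, h2⟩]
    · rw [if_neg h2, if_neg (by tauto)]
  · rw [if_neg h1, if_neg (by tauto)]
    rfl

theorem rect_bGrid1 (rows cols : Int) : Rect (bGrid1 rows cols) := by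
  intro r hr
  unfold bGrid1 at hr ⊢
  simp only [List.length_map, List.length_range] at hr
  rw [mapRange_getD, if_pos hr, headD_eq_getD, mapRange_getD, if_pos (by omega)]
  simp

theorem cell_bCapRows (g : List (List Bool)) (r c : Nat) :
    cell (bCapRows g) r c = (capRow (g.getD r [])).getD c false := by
  unfold cell bCapRows
  by_cases hr : r < g.length
  · rw [List.getD_eq_getElem _ _ (show r < (List.map capRow g).length by
      rw [List.length_map]; exact hr), List.getElem_map, List.getD_eq_getElem _ _ hr]
  · rw [List.getD_eq_default _ _ (show (List.map capRow g).length ≤ r by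
      rw [List.length_map]; omega),
      List.getD_eq_default _ _ (by omega : g.length ≤ r)]
    rfl

theorem rect_bCapRows (g : List (List Bool)) (hR : Rect g) : Rect (bCapRows g) := by
  intro r hr
  have hr' : r < g.length := by simpa [bCapRows] using hr
  have h0 : 0 < g.length := by omega
  have e1 : (bCapRows g).getD r [] = capRow (g.getD r []) := by
    unfold bCapRows
    rw [List.getD_eq_getElem _ _ (by rw [List.length_map]; exact hr'), List.getElem_map,
      List.getD_eq_getElem _ _ hr']
  have e2 : (bCapRows g).headD [] = capRow (g.getD 0 []) := by
    rw [headD_eq_getD]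
    unfold bCapRows
    rw [List.getD_eq_getElem _ _ (by rw [List.length_map]; exact h0), List.getElem_map,
      List.getD_eq_getElem _ _ h0]
  rw [e1, e2]
  simp only [capRow, capRun_length]
  have h3 := hR r hr'
  rwa [headD_eq_getD] at h3
theorem length_bCapCols (g : List (List Bool)) : (bCapCols g).length = g.length := by
  simp [bCapCols]

theorem rowlen_bCapCols (g : List (List Bool)) (r : Nat) (hr : r < g.length) :
    ((bCapCols g).getD r []).length = (g.headD []).length := by
  have hlen : r < (bCapCols g).length := by rw [length_bCapCols]; exact hr
  rw [List.getD_eq_getElem _ _ hlen]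
  simp [bCapCols]

theorem rect_bCapCols (g : List (List Bool)) : Rect (bCapCols g) := by
  intro r hr
  rw [length_bCapCols] at hr
  have h0 : 0 < g.length := by omega
  rw [rowlen_bCapCols g r hr,
    show ((bCapCols g).headD []) = (bCapCols g).getD 0 [] from headD_eq_getD _,
    rowlen_bCapCols g 0 h0]

theorem cell_bCapCols_true (g : List (List Bool)) (r c : Nat)
    (h : cell (bCapCols g) r c = true) : cell g r c = true := by
  rw [cell_bCapCols] at h
  split_ifs at h with hb
  · have h2 := capRun_getD_true _ _ _ h
    by_cases hr : r < g.length
    · rw [List.getD_eq_getElem _ _ (by rw [colB_length]; exact hr), colB_getElem _ _ _ hr] at h2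
      exact h2
    · rw [List.getD_eq_default _ _ (by rw [colB_length]; omega)] at h2
      cases h2

theorem cell_bCapRows_true (g : List (List Bool)) (r c : Nat)
    (h : cell (bCapRows g) r c = true) : cell g r c = true := by
  rw [cell_bCapRows] at h
  exact capRun_getD_true _ _ _ h

theorem zp_g3 (rows cols : Int) : ZP (bCapCols (bCapRows (bGrid1 rows cols))) := by
  intro r c h
  have h1 := cell_bCapRows_true _ _ _ (cell_bCapCols_true _ _ _ h)
  rw [cell_bGrid1] at h1
  split_ifs at h1 with hb
  · unfold filledB at h1
    split_ifs at h1 with h2 h3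
    omega

theorem bQueue_cover (g : List (List Bool)) (nr nc : Nat)
    (hb : ∀ r c, cell g r c = true → r < nr ∧ c < nc) :
    ∀ r c, cell g r c = true → okB g r c = false → (r, c) ∈ bQueue g nr nc := by
  intro r c h _
  rcases hb r c h with ⟨h1, h2⟩
  simp only [bQueue, List.mem_flatMap, List.mem_filterMap, List.mem_range]
  exact ⟨r, h1, c, h2, by rw [if_pos h]⟩

theorem AB_eq (rows cols : Int) : fallback_layout_py rows cols = fallback_layout_py_alt rows cols := by
  show rsLoop (enforceCols (enforceRows
      (if rows > 6 ∧ cols > 6 then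
        pyBandCols rows cols (pyBandRows rows cols (pyFillInterior rows cols (pyBuild rows cols)))
      else pyFillInterior rows cols (pyBuild rows cols))))
    = wl (bCapCols (bCapRows (bGrid1 rows cols)))
        (bQueue (bCapCols (bCapRows (bGrid1 rows cols))) (bCapRows (bGrid1 rows cols)).length
          ((bCapRows (bGrid1 rows cols)).headD []).length)
        (bCapRows (bGrid1 rows cols)).length ((bCapRows (bGrid1 rows cols)).headD []).length
  rw [phase1_eq]
  rw [enforceRows_eq _ (rect_bGrid1 rows cols)]
  rw [enforceCols_eq _ (rect_bCapRows _ (rect_bGrid1 rows cols))]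
  have hbound : ∀ r c, cell (bCapCols (bCapRows (bGrid1 rows cols))) r c = true →
      r < (bCapRows (bGrid1 rows cols)).length ∧
        c < ((bCapRows (bGrid1 rows cols)).headD []).length := by
    intro r c h
    rcases cell_true_lt _ r c h with ⟨u1, u2⟩
    rw [length_bCapCols] at u1
    refine ⟨u1, ?_⟩
    rw [rowlen_bCapCols _ r u1] at u2
    exact u2
  rcases rsLoop_spec _ (rect_bCapCols (bCapRows (bGrid1 rows cols))) (zp_g3 rows cols) with ⟨re1, st1⟩
  rcases wl_spec ((bCapRows (bGrid1 rows cols)).length) (((bCapRows (bGrid1 rows cols)).headD []).length)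
      (bCapCols (bCapRows (bGrid1 rows cols))) _ hbound
      (bQueue_cover _ _ _ hbound) with ⟨re2, st2⟩
  exact final_unique re1 st1 re2 st2

-- ===== VERDICT (by name: the statements are the Claim_ definitions above) =====
theorem fallback_layout_py_spec : Claim_equal_fallback_layout_py := by
  intro rows cols _ _
  unfold Spec_fallback_layout_py
  exact AB_eq rows cols
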